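-- pv_equiv track=rewrite | github.com/jessiepuls/cog | src/cog/ui/widgets/filter_query.py | _last_unquoted
-- ===== SOURCE A (Python) =====
-- def _last_unquoted(text: str, char: str) -> int:
--     """Return index of last occurrence of char outside double quotes, or -1."""
--     in_q = False
--     last = -1
--     for i, c in enumerate(text):
--         if c == '"':
--             in_q = not in_q
--         elif c == char and not in_q:
--             last = i
--     return last
-- ===== SOURCE B (Python) =====
-- def _last_unquoted(text: str, char: str) -> int:
--     """Return index of last occurrence of char outside double quotes, or -1."""
--     # quotes strictly before the current position, maintained right-to-left
--     quotes_before = sum(1 for c in text if c == '"')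
--     for i in range(len(text) - 1, -1, -1):
--         c = text[i]
--         if c == '"':
--             quotes_before -= 1
--         elif c == char and quotes_before % 2 == 0:
--             return i
--     return -1
-- ===== Notes on version B (the rewrite author's own statement) =====
-- stated objective: alternative
-- what changed: Replaced the left-to-right scan carrying an in-quote flag and a 'last match' accumulator by a quote-count pre-pass plus a right-to-left scan that maintains the number of quotes before the current position and returns at the first match found.
import Mathlib
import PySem

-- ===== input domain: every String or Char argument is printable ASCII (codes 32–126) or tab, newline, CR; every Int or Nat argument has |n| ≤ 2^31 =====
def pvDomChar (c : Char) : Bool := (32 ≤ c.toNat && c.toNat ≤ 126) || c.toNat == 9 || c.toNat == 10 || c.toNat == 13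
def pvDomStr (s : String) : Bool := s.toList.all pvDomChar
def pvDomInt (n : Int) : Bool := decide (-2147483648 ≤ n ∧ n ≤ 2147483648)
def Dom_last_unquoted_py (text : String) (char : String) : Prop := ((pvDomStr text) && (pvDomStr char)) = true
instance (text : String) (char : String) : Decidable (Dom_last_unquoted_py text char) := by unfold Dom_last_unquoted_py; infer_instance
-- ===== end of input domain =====

-- B replaces A's left-to-right quote-tracking scan by a quote-count pre-pass plus a
-- right-to-left scan returning at the first match (objective: alternative decomposition).


-- ===== PORT A =====
-- single left-to-right pass over enumerate(text) carrying (in_q, last)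
def last_unquoted_py (text : String) (char : String) : Int :=
  ((PySem.List.enumerate text.toList).foldl
    (fun (st : Bool × Int) (p : Int × Char) =>
      if p.2 = '"' then (!st.1, st.2)
      else if char.toList = [p.2] ∧ st.1 = false then (st.1, p.1)
      else st)
    (false, -1)).2

-- ===== PORT B =====
-- right-to-left scan; qb = number of quotes strictly before the current position
def lastUnqAux (char : String) : List (Int × Char) → Int → Int
  | [], _ => -1
  | (i, c) :: rest, qb =>
    if c = '"' then lastUnqAux char rest (qb - 1)
    else if char.toList = [c] ∧ PySem.Int.mod qb 2 = 0 then i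
    else lastUnqAux char rest qb

def last_unquoted_py_alt (text : String) (char : String) : Int :=
  lastUnqAux char (PySem.List.enumerate text.toList).reverse
    (text.toList.foldl (fun n c => if c = '"' then n + 1 else n) (0 : Int))

-- ===== PRECONDITION & SPEC =====
def Spec_last_unquoted_py (text : String) (char : String) (out : Int) : Prop := out = last_unquoted_py_alt text char
instance (text : String) (char : String) (out : Int) : Decidable (Spec_last_unquoted_py text char out) := by unfold Spec_last_unquoted_py; infer_instance

-- ===== CLAIM (what is proved, stated in full; the proofs are below) =====
def Claim_equal_last_unquoted_py : Prop := ∀ (text : String) (char : String), Dom_last_unquoted_py text char → Spec_last_unquoted_py text char (last_unquoted_py text char)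

-- ===== LEMMAS AND PROOFS =====

-- number of quote characters in a list of (index, char) pairs
def pvQuotes : List (Int × Char) → Int
  | [] => 0
  | p :: r => (if p.2 = '"' then 1 else 0) + pvQuotes r

theorem pvQuotes_append (l m : List (Int × Char)) :
    pvQuotes (l ++ m) = pvQuotes l + pvQuotes m := by
  induction l with
  | nil => simp [pvQuotes]
  | cons p l ih => simp [pvQuotes, ih]; ring

theorem pvQuotes_enumerate (l : List Char) (s : Int) :
    pvQuotes (PySem.List.enumerate l s) =
      l.foldl (fun n c => if c = '"' then n + 1 else n) (0 : Int) := by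
  suffices h : ∀ (l : List Char) (s a : Int),
      a + pvQuotes (PySem.List.enumerate l s) =
        l.foldl (fun n c => if c = '"' then n + 1 else n) a by
    have := h l s 0; omega
  intro l
  induction l with
  | nil => intro s a; simp [PySem.List.enumerate_nil, pvQuotes]
  | cons c l ih =>
      intro s a
      rw [PySem.List.enumerate_cons]
      simp only [pvQuotes, List.foldl_cons]
      rw [← ih (s + 1)]
      split <;> omega

-- the first component of A's fold is the parity of the quotes seen
theorem foldl_fst (char : String) (l : List (Int × Char)) :
    ∀ (q0 : Bool) (a : Int),
    (l.foldl
      (fun (st : Bool × Int) (p : Int × Char) =>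
        if p.2 = '"' then (!st.1, st.2)
        else if char.toList = [p.2] ∧ st.1 = false then (st.1, p.1)
        else st) (q0, a)).1 =
      ((pvQuotes l + (if q0 then 1 else 0)) % 2 = 1 : Bool) := by
  induction l with
  | nil => intro q0 a; cases q0 <;> simp [pvQuotes]
  | cons p l ih =>
      intro q0 a
      rw [List.foldl_cons]
      by_cases hq : p.2 = '"'
      · rw [if_pos hq, ih, decide_eq_decide]
        simp only [pvQuotes, hq]
        cases q0 <;> simp <;> omega
      · rw [if_neg hq]
        have hpv : pvQuotes (p :: l) = pvQuotes l := by simp [pvQuotes, hq]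
        by_cases hm : char.toList = [p.2] ∧ q0 = false
        · rw [if_pos hm, ih, decide_eq_decide, hpv]
        · rw [if_neg hm, ih, decide_eq_decide, hpv]

-- main invariant: B's right-to-left scan agrees with A's fold over the reversed input
theorem lastUnqAux_eq (char : String) (r : List (Int × Char)) :
    ∀ (q0 : Bool) (qb : Int),
    (qb - pvQuotes r.reverse) % 2 = (if q0 then 1 else 0) →
    lastUnqAux char r qb =
      (r.reverse.foldl
        (fun (st : Bool × Int) (p : Int × Char) =>
          if p.2 = '"' then (!st.1, st.2)
          else if char.toList = [p.2] ∧ st.1 = false then (st.1, p.1)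
          else st) (q0, -1)).2 := by
  induction r with
  | nil => intro q0 qb _; simp [lastUnqAux]
  | cons p rest ih =>
      rintro q0 qb h
      obtain ⟨i, c⟩ := p
      rw [List.reverse_cons, List.foldl_append] at *
      rw [pvQuotes_append] at h
      simp only [List.foldl_cons, List.foldl_nil, pvQuotes] at h ⊢
      by_cases hq : c = '"'
      · simp only [lastUnqAux, hq, ite_true]
        rw [ih q0 (qb - 1) (by simp [hq] at h; omega)]
      · simp only [lastUnqAux, if_neg hq]
        simp only [hq, if_false, add_zero] at h
        have hfst := foldl_fst char rest.reverse q0 (-1)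
        have hmod : PySem.Int.mod qb 2 = qb % 2 := by
          simp [PySem.Int.mod]
          rw [Int.fmod_eq_emod]
          simp
        by_cases hm : char.toList = [c]
        · by_cases hp : qb % 2 = 0
          · -- match taken: A's in_q is false here
            have hf : (List.foldl
                (fun (st : Bool × Int) (p : Int × Char) =>
                  if p.2 = '"' then (!st.1, st.2)
                  else if char.toList = [p.2] ∧ st.1 = false then (st.1, p.1)
                  else st) (q0, -1) rest.reverse).1 = false := by
              rw [hfst]
              simp only [decide_eq_false_iff_not]
              cases q0 <;> simp at h ⊢ <;> omega
            rw [if_pos ⟨hm, hmod.trans hp⟩, if_pos ⟨hm, hf⟩]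
          · -- parity odd: A's in_q is true, no match on either side
            have hf : (List.foldl
                (fun (st : Bool × Int) (p : Int × Char) =>
                  if p.2 = '"' then (!st.1, st.2)
                  else if char.toList = [p.2] ∧ st.1 = false then (st.1, p.1)
                  else st) (q0, -1) rest.reverse).1 = true := by
              rw [hfst]
              simp only [decide_eq_true_eq]
              cases q0 <;> simp at h ⊢ <;> omega
            rw [if_neg (by rw [hmod]; tauto),
                if_neg (by rw [hf]; simp), ih q0 qb (by omega)]
        · rw [if_neg (by tauto), if_neg (by tauto), ih q0 qb (by omega)]

-- ===== VERDICT (by name: the statement is the Claim_ definition above) =====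
theorem last_unquoted_py_spec : Claim_equal_last_unquoted_py := by
  intro text char _
  unfold Spec_last_unquoted_py last_unquoted_py last_unquoted_py_alt
  rw [lastUnqAux_eq char ((PySem.List.enumerate text.toList).reverse) false
       _ (by rw [List.reverse_reverse, ← pvQuotes_enumerate text.toList 0]; simp),
     List.reverse_reverse]
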